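-- pv_equiv track=rewrite | github.com/tokotmg/GOA-homework | day 78/homework/homework124.py | logical_calc
-- ===== SOURCE A (Python) =====
-- def logical_calc(array, op):
--     if not array:
--         return None
--     result = array[0]
--     for i in range(1, len(array)):
--         if op == "AND":
--             result = result and array[i]
--         elif op == "OR":
--             result = result or array[i]
--         elif op == "XOR":
--             result = result ^ array[i]
--     return result
-- ===== SOURCE B (Python) =====
-- def logical_calc(array, op):
--     if not array:
--         return None
--     if op == "AND":
--         # first falsy element short-circuits; otherwise the last element
--         return next((x for x in array if not x), array[-1])
--     if op == "OR":
--         # first truthy element short-circuits; otherwise the last element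
--         return next((x for x in array if x), array[-1])
--     if op == "XOR":
--         acc = 0
--         for x in array:
--             acc ^= x
--         return acc
--     return array[0]
-- ===== Notes on version B (the rewrite author's own statement) =====
-- stated objective: idiomatic
-- what changed: B dispatches on the op once up front: AND/OR become short-circuit scans for the first falsy/truthy element (defaulting to the last element), XOR becomes a plain fold from 0 over the whole list, instead of A's single loop that re-tests the op string on every iteration.
import Mathlib
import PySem

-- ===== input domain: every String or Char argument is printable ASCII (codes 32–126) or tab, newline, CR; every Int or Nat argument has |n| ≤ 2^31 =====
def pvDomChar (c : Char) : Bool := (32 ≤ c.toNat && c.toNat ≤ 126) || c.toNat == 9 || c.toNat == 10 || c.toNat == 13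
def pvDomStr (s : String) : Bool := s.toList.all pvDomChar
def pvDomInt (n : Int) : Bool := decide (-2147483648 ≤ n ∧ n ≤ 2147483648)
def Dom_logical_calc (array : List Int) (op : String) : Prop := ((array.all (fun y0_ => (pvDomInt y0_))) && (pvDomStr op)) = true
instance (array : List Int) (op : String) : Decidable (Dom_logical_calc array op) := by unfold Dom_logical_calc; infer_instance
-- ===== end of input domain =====

-- B dispatches on the op once up front (short-circuit scans for AND/OR, a fold-from-0 for XOR)
-- instead of A's single loop re-testing the op each iteration; objective: idiomatic.


-- ===== PORT A =====
-- the body of A's loop: the op string is re-tested on every iteration, as in the Python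
def logical_calc_step (op : String) (result x : Int) : Int :=
  if op == "AND" then (if result == 0 then result else x)
  else if op == "OR" then (if result == 0 then x else result)
  else if op == "XOR" then PySem.Int.bxor result x
  else result

def logical_calc (array : List Int) (op : String) : Option Int :=
  match array with
  | [] => none
  | a :: _ =>
    some ((PySem.List.pyRange 1 (array.length : Int) 1).foldl
      (fun result i => logical_calc_step op result (PySem.List.pyGetD array i 0)) a)

-- ===== PORT B =====
def logical_calc_alt (array : List Int) (op : String) : Option Int :=
  match array with
  | [] => none
  | a :: t =>
    if op == "AND" then
      some (((a :: t).find? (fun x => x == 0)).getD (PySem.List.pyGetD (a :: t) (-1) 0))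
    else if op == "OR" then
      some (((a :: t).find? (fun x => !(x == 0))).getD (PySem.List.pyGetD (a :: t) (-1) 0))
    else if op == "XOR" then
      some ((a :: t).foldl PySem.Int.bxor 0)
    else some a

-- ===== PRECONDITION & SPEC =====
def Spec_logical_calc (array : List Int) (op : String) (out : Option Int) : Prop := out = logical_calc_alt array op
instance (array : List Int) (op : String) (out : Option Int) : Decidable (Spec_logical_calc array op out) := by unfold Spec_logical_calc; infer_instance

-- ===== CLAIM (what is proved, stated in full; the proofs are below) =====
def Claim_equal_logical_calc : Prop := ∀ (array : List Int) (op : String), Dom_logical_calc array op → Spec_logical_calc array op (logical_calc array op)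

-- ===== LEMMAS AND PROOFS =====

theorem foldl_and_zero (t : List Int) :
    t.foldl (fun r x => if r == 0 then r else x) 0 = 0 := by
  induction t with
  | nil => rfl
  | cons y s ih => simpa using ih

theorem foldl_or_fixed (t : List Int) (a : Int) (h : a ≠ 0) :
    t.foldl (fun r x => if r == 0 then x else r) a = a := by
  induction t with
  | nil => rfl
  | cons y s ih => simpa [h] using ih

theorem foldl_and_eq_find (t : List Int) (a : Int) :
    t.foldl (fun r x => if r == 0 then r else x) a
      = (((a :: t).find? (fun x => x == 0)).getD ((a :: t).getLast (by simp))) := by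
  induction t generalizing a with
  | nil =>
    by_cases h : a = 0
    · simp [List.find?, h]
    · have hb : (a == 0) = false := by simpa using h
      simp [List.find?, hb]
  | cons x t ih =>
    by_cases h : a = 0
    · subst h
      have h1 : (if ((0:Int) == 0) = true then (0:Int) else x) = 0 := by simp
      have h2 : ((0:Int) :: x :: t).find? (fun y => y == 0) = some 0 :=
        List.find?_cons_of_pos (by simp)
      rw [List.foldl_cons, h1, foldl_and_zero, h2]
      rfl
    · have hb : (a == 0) = false := by simpa using h
      have h1 : (if (a == 0) = true then a else x) = x := by simp [hb]
      have h2 : (a :: x :: t).find? (fun y => y == 0) = (x :: t).find? (fun y => y == 0) :=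
        List.find?_cons_of_neg (by simp [hb])
      rw [List.foldl_cons, h1, ih x, h2]
      simp [List.getLast_cons]

theorem foldl_or_eq_find (t : List Int) (a : Int) :
    t.foldl (fun r x => if r == 0 then x else r) a
      = (((a :: t).find? (fun x => !(x == 0))).getD ((a :: t).getLast (by simp))) := by
  induction t generalizing a with
  | nil =>
    by_cases h : a = 0
    · simp [List.find?, h]
    · have hb : (a == 0) = false := by simpa using h
      simp [List.find?, hb]
  | cons x t ih =>
    by_cases h : a = 0
    · subst h
      have h1 : (if ((0:Int) == 0) = true then x else (0:Int)) = x := by simp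
      have h2 : ((0:Int) :: x :: t).find? (fun y => !(y == 0)) = (x :: t).find? (fun y => !(y == 0)) :=
        List.find?_cons_of_neg (by simp)
      rw [List.foldl_cons, h1, ih x, h2]
      simp [List.getLast_cons]
    · have hb : (a == 0) = false := by simpa using h
      have h1 : (if (a == 0) = true then x else a) = a := by simp [hb]
      have h2 : (a :: x :: t).find? (fun y => !(y == 0)) = some a :=
        List.find?_cons_of_pos (by simp [hb])
      rw [List.foldl_cons, h1, foldl_or_fixed t a h, h2]
      rfl

theorem foldl_const_int (t : List Int) (a : Int) :
    t.foldl (fun r (_ : Int) => r) a = a := by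
  induction t with
  | nil => rfl
  | cons x s ih => simpa using ih

-- ===== VERDICT (by name: the statement is the Claim_ definition above) =====
theorem logical_calc_spec : Claim_equal_logical_calc := by
  intro array op _
  unfold Spec_logical_calc
  match array with
  | [] => rfl
  | a :: t =>
    show some _ = _
    rw [PySem.List.foldl_pyRange_pyGetD' (xs := a :: t) (f := logical_calc_step op)
      (d := 0) (init := a) (a := 1) (by omega)]
    have hdrop : ((a :: t).drop (1 : Int).toNat) = t := rfl
    rw [hdrop]
    have hlast : PySem.List.pyGetD (a :: t) (-1) 0 = (a :: t).getLast (by simp) :=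
      PySem.List.pyGetD_neg_one (xs := a :: t) 0 (by simp)
    by_cases hA : op = "AND"
    · subst hA
      show some (t.foldl (fun (r x : Int) => if r == 0 then r else x) a)
        = some (((a :: t).find? (fun x => x == 0)).getD (PySem.List.pyGetD (a :: t) (-1) 0))
      rw [hlast]
      exact congrArg some (foldl_and_eq_find t a)
    · have hbA : (op == "AND") = false := by simpa using hA
      by_cases hO : op = "OR"
      · subst hO
        show some (t.foldl (fun (r x : Int) => if r == 0 then x else r) a)
          = some (((a :: t).find? (fun x => !(x == 0))).getD (PySem.List.pyGetD (a :: t) (-1) 0))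
        rw [hlast]
        exact congrArg some (foldl_or_eq_find t a)
      · have hbO : (op == "OR") = false := by simpa using hO
        by_cases hX : op = "XOR"
        · subst hX
          show some (t.foldl (fun (r x : Int) => PySem.Int.bxor r x) a)
            = some ((a :: t).foldl PySem.Int.bxor 0)
          have hx : (a :: t).foldl PySem.Int.bxor 0 = t.foldl PySem.Int.bxor a := by
            simp [PySem.Int.bxor_comm]
          rw [hx]
        · have hbX : (op == "XOR") = false := by simpa using hX
          have hf : logical_calc_step op = fun (r : Int) (_ : Int) => r := by
            funext r x; simp [logical_calc_step, hbA, hbO, hbX]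
          rw [hf]
          show some (t.foldl (fun (r : Int) (_ : Int) => r) a) = logical_calc_alt (a :: t) op
          simp only [logical_calc_alt, hbA, hbO, hbX, Bool.false_eq_true, if_false]
          exact congrArg some (foldl_const_int t a)
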